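-- pv_equiv track=rewrite | github.com/paulfioravanti/plover-platform-specific-translation | plover_platform_specific_translation/config/transformer.py | transform_inbound
-- ===== SOURCE A (Python) =====
-- from typing import (
--     Any,
--     Tuple
-- )
--
-- def transform_inbound(data: dict[str, Any]) -> dict[str, Tuple[str, str]]:
--     """
--     Transform inbound config data, providing defaults values where not provided.
--     """
--     config_platform_translations = (
--         data.get("platform_specific_translations", {})
--     )
--
--     # Check that `config_platform_translations` is a dict[str, list[str]]
--     if (
--         isinstance(config_platform_translations, dict)
--         and all(
--             isinstance(outline_translation, str)
--             and isinstance(resolved_translation, list)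
--             and all(isinstance(item, str) for item in resolved_translation)
--             for outline_translation, resolved_translation
--             in config_platform_translations.items()
--         )
--     ):
--         # Transform the dict[str, list[str]] to a dict[str, Tuple[str, str]]
--         return {
--             outline_translation: tuple(resolved_translation)
--             for outline_translation, resolved_translation
--             in config_platform_translations.items()
--         }
--
--     raise ValueError(
--         "'platform_specific_translations' must be a dict containing "
--         "lists of strings."
--     )
-- ===== SOURCE B (Python) =====
-- _ERROR_MESSAGE = (
--     "'platform_specific_translations' must be a dict containing "
--     "lists of strings."
-- )
--
--
-- def transform_inbound(data):
--     """
--     Transform inbound config data, providing defaults values where not provided.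
--
--     Recursive decomposition: the entry list is consumed head-first and the
--     result dict is assembled back-to-front, each recursion step validating its
--     own entry and prepending it to the converted tail.
--     """
--     config_platform_translations = (
--         data.get("platform_specific_translations", {})
--     )
--     if not isinstance(config_platform_translations, dict):
--         raise ValueError(_ERROR_MESSAGE)
--     return _convert(list(config_platform_translations.items()))
--
--
-- def _convert(items):
--     if not items:
--         return {}
--     outline_translation, resolved_translation = items[0]
--     if not (
--         isinstance(outline_translation, str)
--         and isinstance(resolved_translation, list)
--         and all(isinstance(item, str) for item in resolved_translation)
--     ):
--         raise ValueError(_ERROR_MESSAGE)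
--     return {outline_translation: tuple(resolved_translation), **_convert(items[1:])}
-- ===== Notes on version B (the rewrite author's own statement) =====
-- stated objective: alternative
-- what changed: B replaces A's whole-dict validation pass followed by a dict comprehension with a recursive helper that consumes the entry list head-first and assembles the result dict back-to-front, validating each entry at its own recursion step.
import Mathlib
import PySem

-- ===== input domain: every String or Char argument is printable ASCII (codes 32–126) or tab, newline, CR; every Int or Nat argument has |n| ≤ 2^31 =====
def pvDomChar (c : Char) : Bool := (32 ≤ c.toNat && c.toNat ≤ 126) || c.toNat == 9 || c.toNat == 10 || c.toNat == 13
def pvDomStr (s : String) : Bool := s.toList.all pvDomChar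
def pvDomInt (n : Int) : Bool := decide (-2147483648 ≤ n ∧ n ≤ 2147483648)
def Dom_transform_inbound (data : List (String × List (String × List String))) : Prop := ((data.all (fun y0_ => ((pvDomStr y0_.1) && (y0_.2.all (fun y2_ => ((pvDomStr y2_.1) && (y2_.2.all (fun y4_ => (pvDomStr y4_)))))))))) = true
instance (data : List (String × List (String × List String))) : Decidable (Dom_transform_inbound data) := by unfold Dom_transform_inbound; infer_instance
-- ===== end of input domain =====

-- B replaces A's validate-then-comprehend shape with a recursive helper that builds
-- the result dict back-to-front, one validated entry per recursion step (objective: alternative).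


-- ===== PORT A =====
-- Under the type convention every value already IS a dict[str, list[str]], so the
-- isinstance checks port to `true`; the `raise` branch is therefore unreachable
-- (the guard is literally true) and its arm returns [] only to keep the port total.
def transform_inbound (data : List (String × List (String × List String))) : List (String × List String) :=
  let cfg := (PySem.Dict.mk data).getD "platform_specific_translations" []
  if cfg.all (fun p => true && true && p.2.all (fun _ => true)) then
    (cfg.foldl (fun (d : PySem.Dict String (List String)) p => d.insert p.1 p.2)
      PySem.Dict.empty).items
  else []  -- Python: raise ValueError (unreachable in the typed domain)

-- ===== PORT B =====
-- Source B's `_convert`: empty items -> {}; otherwise `{head-key: head-value, **_convert(rest)}`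
-- (a one-entry dict literal merged with the recursively converted tail; the per-entry
-- isinstance validation is `true` under the type convention).
def tiConvert (items : List (String × List String)) : PySem.Dict String (List String) :=
  match items with
  | [] => PySem.Dict.empty
  | (k, v) :: rest =>
    if true && true && v.all (fun _ => true) then
      (PySem.Dict.empty.insert k v).update (tiConvert rest).items
    else PySem.Dict.empty  -- Python: raise ValueError (unreachable in the typed domain)

def transform_inbound_alt (data : List (String × List (String × List String))) : List (String × List String) :=
  (tiConvert ((PySem.Dict.mk data).getD "platform_specific_translations" [])).items

-- ===== PRECONDITION & SPEC =====
def Spec_transform_inbound (data : List (String × List (String × List String))) (out : List (String × List String)) : Prop := out = transform_inbound_alt data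
instance (data : List (String × List (String × List String))) (out : List (String × List String)) : Decidable (Spec_transform_inbound data out) := by unfold Spec_transform_inbound; infer_instance

-- ===== CLAIM (what is proved, stated in full; the proofs are below) =====
def Claim_equal_transform_inbound : Prop := ∀ (data : List (String × List (String × List String))), Dom_transform_inbound data → Spec_transform_inbound data (transform_inbound data)

-- ===== LEMMAS AND PROOFS =====

-- the value accumulated at key x by replaying a pair list through dict insertion
def tiVStep (x : String) : List String → (String × List String) → List String :=
  fun a p => if x = p.1 then p.2 else a

theorem tiGetD_foldl_insert (l : List (String × List String))
    (d : PySem.Dict String (List String)) (x : String) (dflt : List String) :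
    (l.foldl (fun (d : PySem.Dict String (List String)) p => d.insert p.1 p.2) d).getD x dflt
      = l.foldl (tiVStep x) (d.getD x dflt) := by
  induction l generalizing d with
  | nil => rfl
  | cons p t ih => simp [List.foldl_cons, ih, PySem.Dict.getD_insert, tiVStep]

theorem tiVStep_map_ne (m : List (String × List String)) (k x : String)
    (v : List String) (hx : x ≠ k) (a : List String) :
    (m.map (fun p => if p.1 = k then (k, v) else p)).foldl (tiVStep x) a
      = m.foldl (tiVStep x) a := by
  induction m generalizing a with
  | nil => rfl
  | cons p t ih =>
    simp only [List.map_cons, List.foldl_cons]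
    by_cases hp : p.1 = k
    · rw [if_pos hp]
      have h1 : tiVStep x a (k, v) = a := by simp [tiVStep, hx]
      have h2 : tiVStep x a p = a := by simp only [tiVStep]; rw [if_neg (hp ▸ hx)]
      rw [h1, h2]
      exact ih a
    · rw [if_neg hp]
      exact ih _

theorem tiVStep_map_self_fix (m : List (String × List String)) (k : String)
    (v : List String) :
    (m.map (fun p => if p.1 = k then (k, v) else p)).foldl (tiVStep k) v = v := by
  induction m with
  | nil => rfl
  | cons p t ih =>
    simp only [List.map_cons, List.foldl_cons]
    by_cases hp : p.1 = k
    · rw [if_pos hp]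
      have h1 : tiVStep k v (k, v) = v := by simp [tiVStep]
      rw [h1]; exact ih
    · rw [if_neg hp]
      have h1 : tiVStep k v p = v := by simp only [tiVStep]; rw [if_neg (Ne.symm hp)]
      rw [h1]; exact ih

theorem tiVStep_map_self (m : List (String × List String)) (k : String)
    (v : List String) (hm : k ∈ m.map Prod.fst) (a : List String) :
    (m.map (fun p => if p.1 = k then (k, v) else p)).foldl (tiVStep k) a = v := by
  induction m generalizing a with
  | nil => simp at hm
  | cons p t ih =>
    simp only [List.map_cons, List.foldl_cons]
    by_cases hp : p.1 = k
    · rw [if_pos hp]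
      have h1 : tiVStep k a (k, v) = v := by simp [tiVStep]
      rw [h1]; exact tiVStep_map_self_fix t k v
    · rw [if_neg hp]
      simp only [List.map_cons, List.mem_cons] at hm
      rcases hm with hm | hm
      · exact absurd hm.symm hp
      · have h1 : tiVStep k a p = a := by simp only [tiVStep]; rw [if_neg (Ne.symm hp)]
        rw [h1]; exact ih hm _

-- keys / nodup of a replay (update = insert-fold), via the PySem fold lemmas
theorem tiKeys_update (m : List (String × List String)) (d : PySem.Dict String (List String)) :
    (d.update m).keys = PySem.Set.update d.keys (m.map Prod.fst) :=
  PySem.Dict.keys_foldl_insert_key m Prod.fst (fun _ x => x.2) d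

theorem tiNodup_update (m : List (String × List String)) (d : PySem.Dict String (List String))
    (hd : d.keys.Nodup) : (d.update m).keys.Nodup :=
  PySem.Dict.nodup_keys_foldl_insert_key m Prod.fst (fun _ x => x.2) d hd

-- replaying (e.insert k v) onto d = replaying e onto d, then inserting (k, v)
theorem tiUpdate_insert (d e : PySem.Dict String (List String)) (k : String)
    (v : List String) (hd : d.keys.Nodup) :
    d.update (e.insert k v).items = (d.update e.items).insert k v := by
  by_cases hc : e.contains k = true
  · -- k already a key of e: the insert rewrites k's pair in place
    have hrepl : (fun p : String × List String => if p.1 == k then (k, v) else p)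
        = (fun p : String × List String => if p.1 = k then (k, v) else p) := by
      funext p; simp
    have hitems : (e.insert k v).items
        = e.items.map (fun p => if p.1 = k then (k, v) else p) := by
      rw [PySem.Dict.items_insert_of_contains e v hc, hrepl]
    have hfst : (e.items.map (fun p => if p.1 = k then (k, v) else p)).map Prod.fst
        = e.items.map Prod.fst := by
      rw [List.map_map]
      apply List.map_congr_left
      intro p _
      by_cases hp : p.1 = k
      · simp [hp]
      · simp [hp]
    have hkmem : k ∈ (d.update e.items).keys := by
      rw [tiKeys_update]
      have : k ∈ e.items.map Prod.fst := (PySem.Dict.contains_iff_mem_keys e k).mp hc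
      exact (PySem.Set.mem_update _ _ _).mpr (Or.inr this)
    have hDc : (d.update e.items).contains k = true :=
      (PySem.Dict.contains_iff_mem_keys _ k).mpr hkmem
    have hkeys : (d.update (e.insert k v).items).keys
        = ((d.update e.items).insert k v).keys := by
      rw [PySem.Dict.keys_insert_of_contains _ v hDc, tiKeys_update, tiKeys_update,
        hitems, hfst]
    have hnd1 : (d.update (e.insert k v).items).keys.Nodup := tiNodup_update _ d hd
    have hnd2 : ((d.update e.items).insert k v).keys.Nodup :=
      PySem.Dict.nodup_keys_insert _ _ _ (tiNodup_update _ d hd)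
    apply PySem.Dict.ext
    rw [PySem.Dict.items_eq_map_keys _ hnd1 [], PySem.Dict.items_eq_map_keys _ hnd2 [],
      hkeys]
    apply List.map_congr_left
    intro x _
    have hgL : (d.update (e.insert k v).items).getD x []
        = ((e.insert k v).items).foldl (tiVStep x) (d.getD x []) := by
      rw [PySem.Dict.update]
      exact tiGetD_foldl_insert _ d x []
    have hgD : (d.update e.items).getD x [] = e.items.foldl (tiVStep x) (d.getD x []) := by
      rw [PySem.Dict.update]
      exact tiGetD_foldl_insert _ d x []
    rw [hgL, hitems, PySem.Dict.getD_insert]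
    by_cases hx : x = k
    · rw [if_pos hx, hx]
      have hm : k ∈ e.items.map Prod.fst := (PySem.Dict.contains_iff_mem_keys e k).mp hc
      rw [tiVStep_map_self e.items k v hm _]
    · rw [if_neg hx, tiVStep_map_ne e.items k x v hx, hgD]
  · -- k fresh in e: the insert appends, and so does the replay
    have hc' : e.contains k = false := by simpa using hc
    rw [PySem.Dict.items_insert_of_not_contains e v hc', PySem.Dict.update,
      PySem.Dict.update, List.foldl_append]
    rfl

-- replaying the items of (e.update m) = replaying e's items, then replaying m
theorem tiUpdate_update (m : List (String × List String))
    (d e : PySem.Dict String (List String)) (hd : d.keys.Nodup) :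
    d.update (e.update m).items = (d.update e.items).update m := by
  induction m generalizing e with
  | nil => rfl
  | cons q m ih =>
    have h1 : e.update (q :: m) = (e.insert q.1 q.2).update m := rfl
    rw [h1, ih (e.insert q.1 q.2), tiUpdate_insert d e q.1 q.2 hd]
    rfl

-- a one-entry dict literal
theorem tiInsert_empty (k : String) (v : List String) :
    (PySem.Dict.empty.insert k v).items = [(k, v)] := by
  simp [PySem.Dict.insert, PySem.Dict.empty, PySem.Dict.contains]

-- replaying a converted tail onto d = replaying the raw tail onto d
theorem tiUpdate_tiConvert (l : List (String × List String))
    (d : PySem.Dict String (List String)) (hd : d.keys.Nodup) :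
    d.update (tiConvert l).items = d.update l := by
  induction l generalizing d with
  | nil => rfl
  | cons p t ih =>
    cases p with
    | mk k v =>
      have hg : tiConvert ((k, v) :: t)
          = (PySem.Dict.empty.insert k v).update (tiConvert t).items := by
        simp [tiConvert]
      rw [hg, tiUpdate_update _ d _ hd, tiInsert_empty]
      have h2 : d.update [(k, v)] = d.insert k v := rfl
      rw [h2, ih (d.insert k v) (PySem.Dict.nodup_keys_insert d k v hd)]
      rfl

-- a dict with fresh distinct keys replayed onto d appends its pairs
theorem tiUpdate_fresh (m : List (String × List String))
    (d : PySem.Dict String (List String)) (h : (d.keys ++ m.map Prod.fst).Nodup) :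
    d.update m = PySem.Dict.mk (d.items ++ m) := by
  induction m generalizing d with
  | nil => cases d; simp [PySem.Dict.update]
  | cons p m ih =>
    have hk : p.1 ∉ d.keys := by
      intro hmem
      have := List.disjoint_of_nodup_append h
      exact this hmem (by simp)
    have hc : d.contains p.1 = false := by
      rcases hb : d.contains p.1 with _ | _
      · rfl
      · exact absurd ((PySem.Dict.contains_iff_mem_keys d p.1).mp hb) hk
    have hins : d.insert p.1 p.2 = PySem.Dict.mk (d.items ++ [(p.1, p.2)]) := by
      apply PySem.Dict.ext
      rw [PySem.Dict.items_insert_of_not_contains d p.2 hc]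
    have hstep : d.update (p :: m) = (d.insert p.1 p.2).update m := rfl
    have hkeys : (d.insert p.1 p.2).keys = d.keys ++ [p.1] := by
      rw [hins]
      show (d.items ++ [(p.1, p.2)]).map Prod.fst = _
      simp [PySem.Dict.keys]
    have hnd : ((d.insert p.1 p.2).keys ++ m.map Prod.fst).Nodup := by
      rw [hkeys, List.append_assoc, List.singleton_append]
      simpa using h
    rw [hstep, ih _ hnd, hins]
    simp

-- a dict with distinct keys replayed from empty is itself
theorem tiReplay (e : PySem.Dict String (List String)) (he : e.keys.Nodup) :
    PySem.Dict.empty.update e.items = e := by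
  have h : ((PySem.Dict.empty : PySem.Dict String (List String)).keys
      ++ e.items.map Prod.fst).Nodup := by
    simpa [PySem.Dict.keys_empty] using he
  rw [tiUpdate_fresh e.items PySem.Dict.empty h]
  cases e; simp [PySem.Dict.empty]

-- updating a set with the dedup of a list is updating it with the list
theorem tiSet_update_ofList (s : PySem.Set String) (xs : List String) :
    PySem.Set.update s (PySem.Set.ofList xs) = PySem.Set.update s xs := by
  rw [PySem.Set.update_eq_append_filter, PySem.Set.update_eq_append_filter,
    PySem.Set.ofList_ofList]

theorem tiConvert_keys (l : List (String × List String)) :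
    (tiConvert l).keys = PySem.List.dedup (l.map Prod.fst) := by
  induction l with
  | nil => rfl
  | cons p t ih =>
    cases p with
    | mk k v =>
      have hg : tiConvert ((k, v) :: t)
          = (PySem.Dict.empty.insert k v).update (tiConvert t).items := by
        simp [tiConvert]
      rw [hg, tiKeys_update]
      have hkeys1 : (PySem.Dict.empty.insert k v).keys = [k] := by
        show (PySem.Dict.empty.insert k v).items.map Prod.fst = [k]
        rw [tiInsert_empty]
        rfl
      have hfst : (tiConvert t).items.map Prod.fst = (tiConvert t).keys := rfl
      rw [hkeys1, hfst, ih, PySem.List.dedup_eq_ofList, PySem.List.dedup_eq_ofList,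
        tiSet_update_ofList]
      rfl

theorem tiConvert_nodup_keys (l : List (String × List String)) :
    (tiConvert l).keys.Nodup := by
  rw [tiConvert_keys, PySem.List.dedup_eq_ofList]
  exact PySem.Set.nodup_ofList _

theorem tiConvert_eq_foldl (l : List (String × List String)) :
    tiConvert l
      = l.foldl (fun (d : PySem.Dict String (List String)) p => d.insert p.1 p.2)
          PySem.Dict.empty := by
  have h1 : tiConvert l = PySem.Dict.empty.update (tiConvert l).items :=
    (tiReplay _ (tiConvert_nodup_keys l)).symm
  rw [h1, tiUpdate_tiConvert l PySem.Dict.empty (by simp [PySem.Dict.keys_empty])]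
  rfl

-- ===== VERDICT (by name: the statement is the Claim_ definition above) =====
theorem transform_inbound_spec : Claim_equal_transform_inbound := by
  intro data _
  unfold Spec_transform_inbound transform_inbound transform_inbound_alt
  simp [tiConvert_eq_foldl]
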